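-- pv_equiv track=rewrite | github.com/ryan-gang/Competitive-Programming | Leetcode/Maximum_69_Number.py | maximum69Number1
-- ===== SOURCE A (Python) =====
-- def maximum69Number1(num: int) -> int:
--     place, max_place, number = 1, 0, num
--     while num > 0:
--         if num % 10 == 6:
--             max_place = max(max_place, place)
--         num //= 10
--         place += 1
--
--     return (number + 3 * (10 ** (max_place - 1))) if max_place else number
-- ===== SOURCE B (Python) =====
-- def maximum69Number1(num: int) -> int:
--     q, r = divmod(num, 10)
--     if q == 0:
--         return 9 if r == 6 else r
--     m = maximum69Number1(q)
--     if m != q: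
--         return 10 * m + r
--     return 10 * m + (9 if r == 6 else r)
-- ===== Notes on version B (the rewrite author's own statement) =====
-- stated objective: simpler
-- what changed: A scans digits with a while-loop to compute the place of the most significant 6 and then adds 3*10^(place-1); B is a short recursion on the decimal prefix (num // 10) that rebuilds the number, flipping the last digit 6->9 only when the prefix came back unchanged, so the leftmost 6 is flipped with no place bookkeeping or power computation.
-- outside the precondition, e.g. on maximum69Number1(-6): A returns -6, B raises RecursionError
import Mathlib
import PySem

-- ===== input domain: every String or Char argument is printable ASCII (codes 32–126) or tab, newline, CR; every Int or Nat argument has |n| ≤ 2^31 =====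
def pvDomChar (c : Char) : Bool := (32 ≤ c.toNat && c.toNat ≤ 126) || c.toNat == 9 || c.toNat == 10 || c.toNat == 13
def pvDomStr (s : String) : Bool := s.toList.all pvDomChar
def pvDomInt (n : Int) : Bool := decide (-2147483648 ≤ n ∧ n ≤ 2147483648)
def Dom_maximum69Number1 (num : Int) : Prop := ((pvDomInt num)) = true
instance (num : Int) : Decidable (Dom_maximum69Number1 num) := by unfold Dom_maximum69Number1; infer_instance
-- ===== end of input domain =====

-- B replaces A's while-loop (which records the place of the most significant 6 and adds
-- 3*10^(place-1)) by a short recursion on num // 10 that rebuilds the number, flipping the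
-- last digit 6->9 only when the prefix came back unchanged.  Objective: simpler.

-- ===== PORT A =====
-- A's while-loop: num, place, max_place are the loop state; terminates because num // 10
-- shrinks num.toNat while 0 < num.
def maximum69Number1.loopA (num place max_place : Int) : Int :=
  if h : 0 < num then
    maximum69Number1.loopA (PySem.Int.floordiv num 10) (place + 1)
      (if PySem.Int.mod num 10 = 6 then max max_place place else max_place)
  else max_place
termination_by num.toNat
decreasing_by
  have h10 : PySem.Int.floordiv num 10 = num / 10 :=
    PySem.Int.floordiv_eq_ediv_of_pos (by omega)
  rw [h10]; omega

def maximum69Number1 (num : Int) : Int :=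
  let number := num
  let max_place := maximum69Number1.loopA num 1 0
  -- `if max_place:` — Python truthiness; the exponent max_place - 1 is ≥ 0 whenever the
  -- branch is taken, so `.toNat` is exact there.
  if max_place ≠ 0 then number + 3 * 10 ^ (max_place - 1).toNat else number

-- ===== PORT B =====
-- Source B's recursion, totalised with fuel (num.toNat + 1 suffices for 0 ≤ num; Source B's
-- recursion does not terminate for negative num, which Pre_ excludes).
def maximum69Number1_alt.rec' : Nat → Int → Int
  | 0, _ => 0
  | fuel + 1, num =>
    let q := PySem.Int.floordiv num 10
    let r := PySem.Int.mod num 10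
    if q = 0 then (if r = 6 then 9 else r)
    else
      let m := maximum69Number1_alt.rec' fuel q
      if m ≠ q then 10 * m + r else 10 * m + (if r = 6 then 9 else r)

def maximum69Number1_alt (num : Int) : Int :=
  maximum69Number1_alt.rec' (num.toNat + 1) num

-- ===== PRECONDITION & SPEC =====
-- Pre_ restricts to the task's natural domain num ≥ 0 (the LeetCode problem is about positive
-- integers); on negative inputs A's while-loop never runs and it happens to return num
-- unchanged, while B's natural recursion does not terminate there.
def Pre_maximum69Number1 (num : Int) : Prop := 0 ≤ num
instance (num : Int) : Decidable (Pre_maximum69Number1 num) := by unfold Pre_maximum69Number1; infer_instance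
def pvWitness_maximum69Number1 : Int := (9669)

def Spec_maximum69Number1 (num : Int) (out : Int) : Prop := out = maximum69Number1_alt num
instance (num : Int) (out : Int) : Decidable (Spec_maximum69Number1 num out) := by unfold Spec_maximum69Number1; infer_instance

-- ===== CLAIM (what is proved, stated in full; the proofs are below) =====
def Claim_equal_maximum69Number1 : Prop := ∀ (num : Int), Dom_maximum69Number1 num → Pre_maximum69Number1 num → Spec_maximum69Number1 num (maximum69Number1 num)

-- ===== LEMMAS AND PROOFS =====

-- place (1-indexed from the least significant digit) of the most significant digit 6 of n,
-- or 0 if n has no 6 digit: the common reference of both ports.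
def sixPlace (n : Nat) : Nat :=
  if h : n = 0 then 0
  else
    let m := sixPlace (n / 10)
    if 0 < m then m + 1 else if n % 10 = 6 then 1 else 0
termination_by n
decreasing_by exact Nat.div_lt_self (by omega) (by omega)

theorem sixPlace_zero : sixPlace 0 = 0 := by rw [sixPlace]; simp

theorem sixPlace_eq (n : Nat) (h : n ≠ 0) :
    sixPlace n = if 0 < sixPlace (n / 10) then sixPlace (n / 10) + 1
                 else if n % 10 = 6 then 1 else 0 := by
  rw [sixPlace]; simp [h]

theorem loopA_char (n : Nat) : ∀ (p mp : Int), 0 ≤ mp → mp < p →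
    maximum69Number1.loopA (n : Int) p mp =
      if 0 < sixPlace n then (sixPlace n : Int) + p - 1 else mp := by
  induction n using Nat.strong_induction_on with
  | _ n ih =>
    intro p mp hmp hlt
    by_cases h0 : n = 0
    · rw [maximum69Number1.loopA]; simp [h0, sixPlace_zero]
    · have hdiv : PySem.Int.floordiv (n : Int) 10 = ((n / 10 : Nat) : Int) := by
        exact_mod_cast PySem.Int.floordiv_natCast n 10
      have hmod : PySem.Int.mod (n : Int) 10 = ((n % 10 : Nat) : Int) := by
        exact_mod_cast PySem.Int.mod_natCast n 10
      rw [maximum69Number1.loopA, dif_pos (show (0:Int) < (n : Int) by omega),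
          hdiv, hmod,
          ih (n / 10) (Nat.div_lt_self (by omega) (by omega)) (p + 1) _
            (by split_ifs <;> omega) (by split_ifs <;> omega),
          sixPlace_eq n h0]
      split_ifs <;> push_cast <;> omega

theorem recB_char (fuel : Nat) : ∀ (n : Nat), n < fuel →
    maximum69Number1_alt.rec' fuel (n : Int) =
      (n : Int) + (if 0 < sixPlace n then 3 * 10 ^ (sixPlace n - 1) else 0) := by
  induction fuel with
  | zero => intro n h; omega
  | succ fuel ih =>
    intro n hn
    rw [maximum69Number1_alt.rec']
    have hdiv : PySem.Int.floordiv (n : Int) 10 = ((n / 10 : Nat) : Int) := by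
      exact_mod_cast PySem.Int.floordiv_natCast n 10
    have hmod : PySem.Int.mod (n : Int) 10 = ((n % 10 : Nat) : Int) := by
      exact_mod_cast PySem.Int.mod_natCast n 10
    simp only [hdiv, hmod]
    by_cases hq0 : n / 10 = 0
    · -- n < 10 : the base branch of Source B
      rw [if_pos (show ((n / 10 : Nat) : Int) = 0 by omega)]
      have hs : sixPlace n = if n % 10 = 6 then 1 else 0 := by
        by_cases h0 : n = 0
        · simp [h0, sixPlace_zero]
        · rw [sixPlace_eq n h0, hq0, sixPlace_zero]; simp
      rw [hs]
      by_cases h6 : n % 10 = 6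
      · rw [if_pos (show ((n % 10 : Nat) : Int) = 6 by omega), if_pos h6,
            if_pos (by omega : 0 < 1)]
        norm_num
        omega
      · rw [if_neg (show ((n % 10 : Nat) : Int) ≠ 6 by omega), if_neg h6,
            if_neg (by omega : ¬ 0 < 0)]
        omega
    · -- n ≥ 10 : the recursive branch of Source B
      rw [if_neg (show ((n / 10 : Nat) : Int) ≠ 0 by omega),
          ih (n / 10) (by omega), sixPlace_eq n (by omega)]
      by_cases hs : 0 < sixPlace (n / 10)
      · -- prefix changed: keep the last digit
        have hbnd : (0:Int) < 3 * 10 ^ (sixPlace (n / 10) - 1) := by positivity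
        rw [if_pos hs, if_pos hs,
            if_pos (show ((n / 10 : Nat) : Int) + 3 * 10 ^ (sixPlace (n / 10) - 1)
                      ≠ ((n / 10 : Nat) : Int) by omega),
            if_pos (by omega : 0 < sixPlace (n / 10) + 1)]
        have hexp : (10:Int) ^ (sixPlace (n / 10) + 1 - 1)
                  = 10 ^ (sixPlace (n / 10) - 1) * 10 := by
          rw [← pow_succ]; congr 1; omega
        rw [hexp]
        have hsplit : (n : Int) = 10 * ((n / 10 : Nat) : Int) + ((n % 10 : Nat) : Int) := by
          push_cast; omega
        rw [hsplit]; ring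
      · -- prefix unchanged: flip the last digit if it is a 6
        rw [if_neg hs, if_neg hs, add_zero,
            if_neg (show ¬ ((n / 10 : Nat) : Int) ≠ ((n / 10 : Nat) : Int) by simp)]
        by_cases h6 : n % 10 = 6
        · rw [if_pos (show ((n % 10 : Nat) : Int) = 6 by omega), if_pos h6,
              if_pos (by omega : 0 < 1)]
          norm_num
          omega
        · rw [if_neg (show ((n % 10 : Nat) : Int) ≠ 6 by omega), if_neg h6,
              if_neg (by omega : ¬ 0 < 0)]
          omega

-- ===== VERDICT (by name: the statement is the Claim_ definition above) =====
theorem maximum69Number1_spec : Claim_equal_maximum69Number1 := by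
  intro num _ hpre
  unfold Spec_maximum69Number1 maximum69Number1 maximum69Number1_alt
  have h0 : (0:Int) ≤ num := hpre
  obtain ⟨n, rfl⟩ : ∃ n : Nat, num = (n : Int) := ⟨num.toNat, by omega⟩
  rw [Int.toNat_natCast, loopA_char n 1 0 (by omega) (by omega),
      recB_char (n + 1) n (by omega)]
  by_cases hs : 0 < sixPlace n
  · rw [if_pos hs, if_pos (show ((sixPlace n : Int) + 1 - 1) ≠ 0 by omega), if_pos hs]
    have h1 : ((sixPlace n : Int) + 1 - 1 - 1).toNat = sixPlace n - 1 := by omega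
    rw [h1]
  · rw [if_neg hs, if_neg (show ¬ (0:Int) ≠ 0 by omega), if_neg hs]; omega
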